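-- pv_equiv track=rewrite | github.com/Janhagenkrohn/FCS_Spectrum_fitting | scripts/sort_data.py | search_for_patterns
-- ===== SOURCE A (Python) =====
-- def search_for_patterns(col,
--                         list_of_patterns):
--     new_col = []
--     for element in col:
--         found = False
--         for pattern in list_of_patterns:
--             if pattern.lower() in element.lower():
--                 new_col.append(pattern)
--                 found = True
--                 break
--         if not found:
--             new_col.append('none')
--     return new_col
-- ===== SOURCE B (Python) =====
-- def search_for_patterns(col, list_of_patterns):
--     # Pattern-major traversal: each pattern is lowered once and stamped onto
--     # every still-unlabelled element; unlabelled slots become 'none' at the end.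
--     lowered = [element.lower() for element in col]
--     labels = [None] * len(col)
--     for pattern in list_of_patterns:
--         pl = pattern.lower()
--         for i, e in enumerate(lowered):
--             if labels[i] is None and pl in e:
--                 labels[i] = pattern
--     return [lab if lab is not None else 'none' for lab in labels]
-- ===== Notes on version B (the rewrite author's own statement) =====
-- stated objective: alternative
-- what changed: B swaps the loop nesting: it iterates patterns in the outer loop, lowering each pattern and each element exactly once, and stamps each pattern onto every still-unlabelled element in a labels array, instead of A's element-major inner scan with a break; unlabelled slots become 'none' at the end.
import Mathlib
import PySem

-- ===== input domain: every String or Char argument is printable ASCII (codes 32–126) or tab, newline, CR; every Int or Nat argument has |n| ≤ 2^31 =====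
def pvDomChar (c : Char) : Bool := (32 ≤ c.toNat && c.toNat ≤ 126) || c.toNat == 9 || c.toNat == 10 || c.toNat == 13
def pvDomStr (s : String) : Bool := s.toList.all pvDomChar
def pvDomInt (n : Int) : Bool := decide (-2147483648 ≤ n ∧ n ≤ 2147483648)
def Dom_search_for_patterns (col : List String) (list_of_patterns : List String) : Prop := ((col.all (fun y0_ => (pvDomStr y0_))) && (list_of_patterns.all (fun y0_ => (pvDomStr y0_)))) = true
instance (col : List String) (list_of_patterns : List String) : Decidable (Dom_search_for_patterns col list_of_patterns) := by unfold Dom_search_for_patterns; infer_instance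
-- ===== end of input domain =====

-- B swaps the loop nesting (pattern-major stamping into a labels array) instead of
-- A's element-major scan with break; same results, alternative structure (not claimed faster).

-- ===== PORT A =====
-- inner 'for pattern … break' loop of A: first pattern whose lowercase is a substring
def aFind (element : String) : List String → Option String
  | [] => none
  | p :: rest =>
      if PySem.Str.isIn (PySem.Str.lower p) (PySem.Str.lower element) then some p
      else aFind element rest

def search_for_patterns (col : List String) (list_of_patterns : List String) : List String :=
  col.foldl (fun new_col element =>
    match aFind element list_of_patterns with
    | some p => new_col ++ [p]
    | none => new_col ++ ["none"]) []

-- ===== PORT B =====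
-- inner 'for i, e in enumerate(lowered)' loop of B: stamp pattern onto unlabelled matches
def bStep (pattern : String) (lowered : List String) (labels : List (Option String)) :
    List (Option String) :=
  List.zipWith (fun e lab =>
    match lab with
    | none => if PySem.Str.isIn (PySem.Str.lower pattern) e then some pattern else none
    | some x => some x) lowered labels

def search_for_patterns_alt (col : List String) (list_of_patterns : List String) : List String :=
  let lowered := col.map PySem.Str.lower
  let labels := list_of_patterns.foldl (fun labels pattern => bStep pattern lowered labels)
    (List.replicate col.length none)
  labels.map (fun lab => lab.getD "none")

-- ===== PRECONDITION & SPEC =====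
def Spec_search_for_patterns (col : List String) (list_of_patterns : List String) (out : List String) : Prop := out = search_for_patterns_alt col list_of_patterns
instance (col : List String) (list_of_patterns : List String) (out : List String) : Decidable (Spec_search_for_patterns col list_of_patterns out) := by unfold Spec_search_for_patterns; infer_instance

-- ===== CLAIM (what is proved, stated in full; the proofs are below) =====
def Claim_equal_search_for_patterns : Prop := ∀ (col : List String) (list_of_patterns : List String), Dom_search_for_patterns col list_of_patterns → Spec_search_for_patterns col list_of_patterns (search_for_patterns col list_of_patterns)

-- ===== LEMMAS AND PROOFS =====

-- first pattern in ps whose lowercase occurs in the (already lowered) string e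
def firstMatch (e : String) : List String → Option String
  | [] => none
  | p :: rest => if PySem.Str.isIn (PySem.Str.lower p) e then some p else firstMatch e rest

theorem aFind_eq (e : String) (ps : List String) :
    aFind e ps = firstMatch (PySem.Str.lower e) ps := by
  induction ps with
  | nil => rfl
  | cons p rest ih => simp [aFind, firstMatch, ih]

theorem zipWith_zipWith {α β γ : Type} (f : α → β → γ) (g : α → β → β) :
    ∀ (xs : List α) (ys : List β),
    List.zipWith f xs (List.zipWith g xs ys) = List.zipWith (fun a b => f a (g a b)) xs ys := by
  intro xs
  induction xs with
  | nil => simp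
  | cons x xt ih => intro ys; cases ys <;> simp [List.zipWith, ih]

theorem foldl_bStep (ps : List String) :
    ∀ (lowered : List String) (labels : List (Option String)),
    labels.length = lowered.length →
    ps.foldl (fun l p => bStep p lowered l) labels =
      List.zipWith (fun e lab =>
        match lab with
        | some x => some x
        | none => firstMatch e ps) lowered labels := by
  induction ps with
  | nil =>
    intro lowered labels h
    simp only [List.foldl_nil, firstMatch]
    symm
    induction lowered generalizing labels with
    | nil => cases labels <;> simp_all
    | cons x xt ih2 =>
      cases labels with
      | nil => simp at h
      | cons y yt =>
        simp only [List.length_cons, Nat.add_right_cancel_iff] at h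
        cases y <;> simp [List.zipWith, ih2 yt h]
  | cons p rest ih =>
    intro lowered labels h
    rw [List.foldl_cons, ih lowered _ (by simp [bStep]; omega)]
    unfold bStep
    rw [zipWith_zipWith]
    congr 1
    funext e lab
    cases lab with
    | some x => rfl
    | none =>
      simp only [firstMatch]
      cases hb : PySem.Str.isIn (PySem.Str.lower p) e <;> simp

theorem zipWith_map_replicate {α β γ : Type} (f : α → β) (g : β → Option γ → Option γ)
    (xs : List α) :
    List.zipWith g (xs.map f) (List.replicate xs.length none) =
      xs.map (fun a => g (f a) none) := by
  induction xs with
  | nil => rfl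
  | cons x xt ih => simp [List.replicate, ih]

theorem alt_eq_map (col ps : List String) :
    search_for_patterns_alt col ps =
      col.map (fun e => (firstMatch (PySem.Str.lower e) ps).getD "none") := by
  show (List.map (fun lab => lab.getD "none")
      (ps.foldl (fun labels pattern => bStep pattern (col.map PySem.Str.lower) labels)
        (List.replicate col.length none))) = _
  rw [foldl_bStep ps _ _ (by simp), zipWith_map_replicate]
  simp

theorem a_foldl_eq (ps : List String) (col : List String) :
    ∀ acc, col.foldl (fun nc e =>
        match aFind e ps with
        | some p => nc ++ [p]
        | none => nc ++ ["none"]) acc =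
      acc ++ col.map (fun e => (firstMatch (PySem.Str.lower e) ps).getD "none") := by
  induction col with
  | nil => simp
  | cons e t ih =>
    intro acc
    rw [List.foldl_cons, ih, aFind_eq]
    cases hfm : firstMatch (PySem.Str.lower e) ps <;> simp [hfm]

-- ===== VERDICT (by name: the statement is the Claim_ definition above) =====
theorem search_for_patterns_spec : Claim_equal_search_for_patterns := by
  intro col ps _
  unfold Spec_search_for_patterns search_for_patterns
  rw [a_foldl_eq, alt_eq_map]
  simp
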